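-- pv_equiv track=rewrite | github.com/NovikovAndrei/ratnote | rat_notebook/results/tests/test_scoring_champ.py | _competition_places
-- ===== SOURCE A (Python) =====
-- def _competition_places(items):
--     """items: list[(name, total)] → {name: place} по competition ranking."""
--     items_sorted = sorted(items, key=lambda t: t[1], reverse=True)
--     places = {}
--     last = None
--     place = 0
--     idx = 0
--     for name, total in items_sorted:
--         idx += 1
--         if total != last:
--             place = idx
--             last = total
--         places[name] = place
--     return places
-- ===== SOURCE B (Python) =====
-- def _competition_places(items):
--     """items: list[(name, total)] -> {name: place} by competition ranking.
--
--     Each place is computed independently as 1 + number of strictly greater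
--     totals; iterating the descending-sorted list reproduces the dict's
--     insertion/overwrite order."""
--     items_sorted = sorted(items, key=lambda t: t[1], reverse=True)
--     totals = [t for _, t in items_sorted]
--     return {name: 1 + sum(1 for x in totals if x > total)
--             for name, total in items_sorted}
-- ===== Notes on version B (the rewrite author's own statement) =====
-- stated objective: alternative
-- what changed: Replaces A's running last/place/idx accumulator loop with a stateless dict comprehension that computes each place independently as 1 + the count of strictly greater totals.
import Mathlib
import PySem

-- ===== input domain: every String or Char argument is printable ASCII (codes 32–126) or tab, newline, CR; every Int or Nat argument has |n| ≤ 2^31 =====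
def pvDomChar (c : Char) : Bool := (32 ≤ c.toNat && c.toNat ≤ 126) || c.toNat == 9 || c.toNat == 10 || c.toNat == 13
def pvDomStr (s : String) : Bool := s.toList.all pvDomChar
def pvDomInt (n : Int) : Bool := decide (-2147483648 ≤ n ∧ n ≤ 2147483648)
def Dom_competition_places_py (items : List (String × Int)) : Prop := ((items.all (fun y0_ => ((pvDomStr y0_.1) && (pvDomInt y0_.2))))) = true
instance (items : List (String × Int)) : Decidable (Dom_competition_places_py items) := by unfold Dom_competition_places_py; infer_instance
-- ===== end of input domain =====

-- B is an alternative stateless formulation: each place computed independently as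
-- 1 + count of strictly greater totals, instead of A's running last/place/idx state.

-- ===== PORT A =====
-- one loop step of A: state = (places, last, place, idx)
def pvAStep (st : PySem.Dict String Int × Option Int × Int × Int) (p : String × Int) :
    PySem.Dict String Int × Option Int × Int × Int :=
  match st with
  | (places, last, place, idx) =>
    let idx := idx + 1
    if some p.2 ≠ last then
      (places.insert p.1 idx, some p.2, idx, idx)
    else
      (places.insert p.1 place, last, place, idx)

def competition_places_py (items : List (String × Int)) : List (String × Int) :=
  let items_sorted := PySem.List.sorted items (fun t => t.2) true
  (items_sorted.foldl pvAStep (PySem.Dict.empty, none, 0, 0)).1.items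

-- ===== PORT B =====
def competition_places_py_alt (items : List (String × Int)) : List (String × Int) :=
  let items_sorted := PySem.List.sorted items (fun t => t.2) true
  let totals := items_sorted.map (fun p => p.2)
  (items_sorted.foldl
    (fun (d : PySem.Dict String Int) p =>
      d.insert p.1 (1 + ((totals.countP (fun x => decide (x > p.2)) : Nat) : Int)))
    PySem.Dict.empty).items

-- ===== PRECONDITION & SPEC =====
def Spec_competition_places_py (items : List (String × Int)) (out : List (String × Int)) : Prop := out = competition_places_py_alt items
instance (items : List (String × Int)) (out : List (String × Int)) : Decidable (Spec_competition_places_py items out) := by unfold Spec_competition_places_py; infer_instance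

-- ===== CLAIM (what is proved, stated in full; the proofs are below) =====
def Claim_equal_competition_places_py : Prop := ∀ (items : List (String × Int)), Dom_competition_places_py items → Spec_competition_places_py items (competition_places_py items)

-- ===== LEMMAS AND PROOFS =====

-- count of strictly greater totals in L, as an Int
def pvCnt (L : List (String × Int)) (t : Int) : Int :=
  ((L.map (fun p => p.2)).countP (fun x => decide (x > t)) : Nat)

lemma pvCnt_split (done s : List (String × Int)) (t : Int)
    (hle : ∀ q ∈ s, q.2 ≤ t) :
    pvCnt (done ++ s) t = ((done.countP (fun q => decide (t < q.2)) : Nat) : Int) := by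
  unfold pvCnt
  rw [List.map_append, List.countP_append]
  have h0 : (s.map (fun p => p.2)).countP (fun x => decide (x > t)) = 0 := by
    rw [List.countP_eq_zero]
    intro x hx
    simp only [List.mem_map] at hx
    obtain ⟨q, hq, rfl⟩ := hx
    simpa using not_lt.mpr (hle q hq)
  rw [h0, List.countP_map]
  simp [Function.comp_def]

-- every element of a descending-pairwise list is ≥ its last element
lemma pvLast_min (done : List (String × Int)) (lv : Int)
    (hpw : done.Pairwise (fun a b => b.2 ≤ a.2))
    (hgl : (done.map (fun p => p.2)).getLast? = some lv) :
    ∀ q ∈ done, lv ≤ q.2 := by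
  intro q hq
  obtain ⟨m', hm'⟩ := List.getLast?_eq_some_iff.mp hgl
  have hmap : (done.map (fun p => p.2)).Pairwise (fun a b => b ≤ a) :=
    List.Pairwise.map _ (fun _ _ h => h) hpw
  have hq2 : q.2 ∈ m' ++ [lv] := hm' ▸ List.mem_map_of_mem hq
  rw [hm'] at hmap
  rcases List.mem_append.mp hq2 with h | h
  · exact (List.pairwise_append.mp hmap).2.2 q.2 h lv (by simp)
  · simp at h; omega

-- the heart: A's loop with a valid state equals B's per-item-count fold
lemma pvLoop_eq (L : List (String × Int))
    (hpw : L.Pairwise (fun a b => b.2 ≤ a.2)) :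
    ∀ (s done : List (String × Int)) (d : PySem.Dict String Int)
      (last : Option Int) (place idx : Int),
      done ++ s = L →
      idx = (done.length : Int) →
      ((last = none ∧ done = []) ∨
        (∃ lv, last = some lv ∧ place = pvCnt L lv + 1 ∧
          (done.map (fun p => p.2)).getLast? = some lv)) →
      (s.foldl pvAStep (d, last, place, idx)).1
        = s.foldl (fun (d : PySem.Dict String Int) p => d.insert p.1 (1 + pvCnt L p.2)) d := by
  intro s
  induction s with
  | nil => intro done d last place idx _ _ _; simp [List.foldl]
  | cons p rest ih =>
    intro done d last place idx hL hidx hlast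
    have hsplit : ∀ q ∈ p :: rest, q.2 ≤ p.2 := by
      intro q hq
      rcases List.mem_cons.mp hq with rfl | hq
      · exact le_rfl
      · have h2 := (List.pairwise_append.mp (hL ▸ hpw)).2.1
        exact (List.pairwise_cons.mp h2).1 q hq
    have hdone_ge : ∀ q ∈ done, p.2 ≤ q.2 := by
      intro q hq
      have h2 := (List.pairwise_append.mp (hL ▸ hpw)).2.2
      exact h2 q hq p (List.mem_cons_self)
    have hdone_pw : done.Pairwise (fun a b => b.2 ≤ a.2) :=
      (List.pairwise_append.mp (hL ▸ hpw)).1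
    have hcnt : pvCnt L p.2 = ((done.countP (fun q => decide (p.2 < q.2)) : Nat) : Int) := by
      rw [← hL]; exact pvCnt_split done (p :: rest) p.2 hsplit
    have hL' : (done ++ [p]) ++ rest = L := by simpa using hL
    have hlast' : ((done ++ [p]).map (fun p => p.2)).getLast? = some p.2 := by simp
    by_cases hne : some p.2 ≠ last
    · -- new total: A sets place := idx+1 = 1 + count of strictly greater totals
      have hall : done.countP (fun q => decide (p.2 < q.2)) = done.length := by
        rw [List.countP_eq_length]
        intro q hq
        rcases hlast with ⟨_, hd⟩ | ⟨lv, hlv, _, hgl⟩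
        · subst hd; simp at hq
        · have hlvq : lv ≤ q.2 := pvLast_min done lv hdone_pw hgl q hq
          have hlv_mem : lv ∈ done.map (fun p => p.2) := List.mem_of_getLast? hgl
          obtain ⟨ql, hql, hql2⟩ := List.mem_map.mp hlv_mem
          have hlvp : p.2 ≤ lv := hql2 ▸ hdone_ge ql hql
          have hne' : p.2 ≠ lv := fun h => hne (by simp [hlv, h])
          have : p.2 < q.2 := lt_of_lt_of_le (lt_of_le_of_ne hlvp hne') hlvq
          simpa using this
      have hval : idx + 1 = 1 + pvCnt L p.2 := by rw [hcnt, hall, hidx]; omega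
      simp only [List.foldl_cons, pvAStep, if_pos hne]
      rw [hval]
      exact ih (done ++ [p]) _ (some p.2) _ _ hL'
        (by rw [← hval, hidx]; simp)
        (Or.inr ⟨p.2, rfl, by omega, hlast'⟩)
    · -- repeated total: A keeps place, which already equals 1 + count of greater totals
      rcases hlast with ⟨hnone, _⟩ | ⟨lv, hlv, hplace, hgl⟩
      · rw [hnone] at hne; simp at hne
      · have hpe : p.2 = lv := by
          rw [hlv] at hne; simpa using not_not.mp (by simpa using hne)
        have hval : place = 1 + pvCnt L p.2 := by rw [hpe, hplace]; omega
        have hbr : ¬ some p.2 ≠ last := hne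
        simp only [List.foldl_cons, pvAStep, if_neg hbr]
        rw [hval]
        exact ih (done ++ [p]) _ last _ _ hL'
          (by rw [hidx]; simp)
          (Or.inr ⟨p.2, by rw [hlv, hpe], by omega, hlast'⟩)

-- ===== VERDICT (by name: the statement is the Claim_ definition above) =====
theorem competition_places_py_spec : Claim_equal_competition_places_py := by
  intro items _
  unfold Spec_competition_places_py competition_places_py competition_places_py_alt
  have hpw : (PySem.List.sorted items (fun t => t.2) true).Pairwise (fun a b => b.2 ≤ a.2) :=
    PySem.List.sorted_pairwise_rev items (fun t => t.2)
  have h := pvLoop_eq (PySem.List.sorted items (fun t => t.2) true) hpw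
    (PySem.List.sorted items (fun t => t.2) true) [] PySem.Dict.empty none 0 0 rfl (by simp)
    (Or.inl ⟨rfl, rfl⟩)
  simp only []
  rw [h]
  rfl
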